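-- pv_equiv track=rewrite | github.com/JackivGarg/The-Interviewer | backend/graph/nodes.py | _get_last_qa
-- ===== SOURCE A (Python) =====
-- def _get_last_qa(messages: list) -> tuple[str, str]:
--     """Returns (last_ai_message, last_user_message) from conversation history."""
--     last_user = ""
--     last_ai = ""
--     for msg in reversed(messages):
--         if msg.get("role") == "user" and not last_user:
--             last_user = msg.get("content", "")
--         elif msg.get("role") == "model" and not last_ai:
--             last_ai = msg.get("content", "")
--         if last_user and last_ai:
--             break
--     return last_ai, last_user
-- ===== SOURCE B (Python) =====
-- def _get_last_qa(messages: list) -> tuple[str, str]: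
--     """Returns (last_ai_message, last_user_message) from conversation history."""
--     last_user = ""
--     last_ai = ""
--     for msg in messages:
--         content = msg.get("content", "")
--         if content:
--             role = msg.get("role")
--             if role == "user":
--                 last_user = content
--             elif role == "model":
--                 last_ai = content
--     return last_ai, last_user
-- ===== Notes on version B (the rewrite author's own statement) =====
-- stated objective: simpler
-- what changed: Replaces the reverse scan with only-if-unset assignments and an early break by a single forward fold that overwrites the two slots on every non-empty matching message.
import Mathlib
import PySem

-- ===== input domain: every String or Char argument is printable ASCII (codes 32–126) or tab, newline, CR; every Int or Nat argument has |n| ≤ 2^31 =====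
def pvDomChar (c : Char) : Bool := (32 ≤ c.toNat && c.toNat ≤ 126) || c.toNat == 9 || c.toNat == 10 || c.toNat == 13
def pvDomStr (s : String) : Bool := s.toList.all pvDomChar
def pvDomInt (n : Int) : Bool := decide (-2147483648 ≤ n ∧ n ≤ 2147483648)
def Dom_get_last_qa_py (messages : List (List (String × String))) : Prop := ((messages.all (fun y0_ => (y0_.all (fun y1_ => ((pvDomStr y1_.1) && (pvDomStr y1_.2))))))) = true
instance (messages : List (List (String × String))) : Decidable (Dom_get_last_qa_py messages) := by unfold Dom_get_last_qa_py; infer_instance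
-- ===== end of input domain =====

-- B replaces A's reverse scan (assign only while unset, break when both found) by a single
-- forward fold that overwrites the two slots on each non-empty matching message (objective: simpler).


-- msg.get("role") / msg.get("content", "")
def pvRole (m : List (String × String)) : Option String := (PySem.Dict.mk m).get? "role"
def pvContent (m : List (String × String)) : String := (PySem.Dict.mk m).getD "content" ""

-- ===== PORT A =====
-- loop over reversed(messages); break modelled by returning early
def pvGoA : List (List (String × String)) → String → String → String × String
  | [], lu, la => (la, lu)
  | m :: rest, lu, la =>
    let p : String × String :=
      if pvRole m = some "user" ∧ lu = "" then (pvContent m, la)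
      else if pvRole m = some "model" ∧ la = "" then (lu, pvContent m)
      else (lu, la)
    if p.1 ≠ "" ∧ p.2 ≠ "" then (p.2, p.1) else pvGoA rest p.1 p.2

def get_last_qa_py (messages : List (List (String × String))) : String × String :=
  pvGoA messages.reverse "" ""

-- ===== PORT B =====
def pvStepB (s : String × String) (m : List (String × String)) : String × String :=
  let c := pvContent m
  if c ≠ "" then
    if pvRole m = some "user" then (c, s.2)
    else if pvRole m = some "model" then (s.1, c)
    else s
  else s

def get_last_qa_py_alt (messages : List (List (String × String))) : String × String :=
  let s := messages.foldl pvStepB ("", "")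
  (s.2, s.1)

-- ===== PRECONDITION & SPEC =====
def Spec_get_last_qa_py (messages : List (List (String × String))) (out : String × String) : Prop := out = get_last_qa_py_alt messages
instance (messages : List (List (String × String))) (out : String × String) : Decidable (Spec_get_last_qa_py messages out) := by unfold Spec_get_last_qa_py; infer_instance

-- ===== CLAIM (what is proved, stated in full; the proofs are below) =====
def Claim_equal_get_last_qa_py : Prop := ∀ (messages : List (List (String × String))), Dom_get_last_qa_py messages → Spec_get_last_qa_py messages (get_last_qa_py messages)

-- ===== LEMMAS AND PROOFS =====

-- first message in the list whose role is r and whose content is non-empty; "" if none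
def pvFirst (r : String) : List (List (String × String)) → String
  | [] => ""
  | m :: rest => if pvRole m = some r ∧ pvContent m ≠ "" then pvContent m else pvFirst r rest

theorem pvFirst_append (r : String) (xs ys : List (List (String × String))) :
    pvFirst r (xs ++ ys) = if pvFirst r xs = "" then pvFirst r ys else pvFirst r xs := by
  induction xs with
  | nil => simp [pvFirst]
  | cons m rest ih =>
    simp only [List.cons_append, pvFirst]
    by_cases h : pvRole m = some r ∧ pvContent m ≠ ""
    · simp [h, h.2]
    · simp [h, ih]

theorem pvGoA_eq (l : List (List (String × String))) :
    ∀ lu la, pvGoA l lu la =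
      ((if la = "" then pvFirst "model" l else la),
       (if lu = "" then pvFirst "user" l else lu)) := by
  induction l with
  | nil => intro lu la; simp [pvGoA, pvFirst]
  | cons m rest ih =>
    intro lu la
    simp only [pvGoA, pvFirst]
    by_cases hu : pvRole m = some "user" ∧ lu = ""
    · have hnm : ¬ pvRole m = some "model" := by
        intro h; rw [hu.1] at h; simp at h
      by_cases hc : pvContent m = ""
      · simp [hu, hu.2, hnm, hc, ih]
      · by_cases hla : la = ""
        · simp [hu, hu.2, hnm, hc, hla, ih]
        · simp [hu, hu.2, hnm, hc, hla, ih]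
    · by_cases hm : pvRole m = some "model" ∧ la = ""
      · have hnu : ¬ pvRole m = some "user" := by
          intro h; rw [hm.1] at h; simp at h
        by_cases hc : pvContent m = ""
        · simp [hu, hm, hm.2, hnu, hc, ih]
        · by_cases hlu : lu = ""
          · simp [hu, hm, hm.2, hnu, hc, hlu, ih]
          · simp [hu, hm, hm.2, hnu, hc, hlu, ih]
      · -- neither branch fires
        rcases Decidable.not_and_iff_or_not.mp hu with h1 | h1 <;>
        rcases Decidable.not_and_iff_or_not.mp hm with h2 | h2
        · by_cases hlu : lu = "" <;> by_cases hla : la = "" <;>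
            simp [hu, hm, h1, h2, hlu, hla, ih]
        · by_cases hlu : lu = "" <;>
            simp [hu, hm, h1, h2, hlu, ih]
        · by_cases hla : la = "" <;>
            simp [hu, hm, h1, h2, hla, ih]
        · simp [hu, hm, h1, h2, ih]

theorem pvFoldB_eq (l : List (List (String × String))) :
    ∀ s : String × String, l.foldl pvStepB s =
      ((if pvFirst "user" l.reverse = "" then s.1 else pvFirst "user" l.reverse),
       (if pvFirst "model" l.reverse = "" then s.2 else pvFirst "model" l.reverse)) := by
  induction l with
  | nil => intro s; simp [pvFirst]
  | cons m rest ih =>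
    intro s
    rw [List.foldl_cons, ih, List.reverse_cons, pvFirst_append, pvFirst_append]
    simp only [pvStepB, pvFirst]
    by_cases hc : pvContent m = ""
    · simp only [hc, ne_eq, not_true_eq_false, if_false, ite_self]
      split_ifs <;> simp_all
    · by_cases hu : pvRole m = some "user"
      · have hnm : ¬ pvRole m = some "model" := by
          intro h; rw [hu] at h; simp at h
        by_cases h1 : pvFirst "user" rest.reverse = "" <;>
        by_cases h2 : pvFirst "model" rest.reverse = "" <;>
          simp [hc, hu, h1, h2]
      · by_cases hm : pvRole m = some "model"
        · by_cases h1 : pvFirst "user" rest.reverse = "" <;>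
          by_cases h2 : pvFirst "model" rest.reverse = "" <;>
            simp [hc, hm, h1, h2]
        · by_cases h1 : pvFirst "user" rest.reverse = "" <;>
          by_cases h2 : pvFirst "model" rest.reverse = "" <;>
            simp [hc, hu, hm, h1, h2]

-- ===== VERDICT (by name: the statement is the Claim_ definition above) =====
theorem get_last_qa_py_spec : Claim_equal_get_last_qa_py := by
  intro messages _
  unfold Spec_get_last_qa_py get_last_qa_py get_last_qa_py_alt
  rw [pvGoA_eq, pvFoldB_eq]
  simp
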